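-- pv_equiv track=rewrite | github.com/Gioele-M/biospyder_app | functions.py | gc_subsequence
-- ===== SOURCE A (Python) =====
-- def gc_subsequence(seq):
--     highest_subseq = ''
--     highest_content = 0
--     for x in range(len(seq)-9):
--         subseq = seq[x:x+10]
--         gc_content = subseq.count('G') + subseq.count('C')
--         if gc_content > highest_content:
--             highest_content = gc_content
--             highest_subseq = subseq
--     if highest_content == 0:
--         return 'This sequence has no G or C', 0
--     return highest_subseq, highest_content
-- ===== SOURCE B (Python) =====
-- def gc_subsequence(seq):
--     # Prefix-sum of G/C counts: prefix[i] = number of G or C in seq[:i].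
--     prefix = [0]
--     for ch in seq:
--         prefix.append(prefix[-1] + (1 if ch == 'G' or ch == 'C' else 0))
--     best_x, best = -1, 0
--     for x in range(len(seq) - 9):
--         win = prefix[x + 10] - prefix[x]
--         if win > best:
--             best_x, best = x, win
--     if best == 0:
--         return 'This sequence has no G or C', 0
--     return seq[best_x:best_x + 10], best
-- ===== Notes on version B (the rewrite author's own statement) =====
-- stated objective: faster
-- what changed: Replaces the per-window slice-and-count (two .count scans over every 10-char slice) with a single prefix-sum pass, so each window's GC count is one subtraction; same strict-> first-max tie-break and sentinel.
import Mathlib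
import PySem

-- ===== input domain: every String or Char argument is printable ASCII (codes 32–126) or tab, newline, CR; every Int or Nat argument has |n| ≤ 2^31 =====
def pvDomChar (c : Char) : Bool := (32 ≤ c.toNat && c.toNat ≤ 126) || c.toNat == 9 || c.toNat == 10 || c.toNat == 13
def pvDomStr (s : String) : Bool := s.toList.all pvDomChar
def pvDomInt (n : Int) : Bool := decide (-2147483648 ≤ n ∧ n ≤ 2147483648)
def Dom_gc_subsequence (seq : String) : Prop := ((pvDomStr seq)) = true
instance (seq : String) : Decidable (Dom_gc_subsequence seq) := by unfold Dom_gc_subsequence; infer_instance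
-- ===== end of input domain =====

-- B replaces the per-window slice-and-two-counts with one prefix-sum pass, one subtraction per window; same result.

-- ===== PORT A =====
def gc_subsequence (seq : String) : String × Int :=
  let r := (PySem.List.pyRange 0 (PySem.Str.len seq - 9)).foldl
    (fun (st : String × Int) x =>
      let subseq := PySem.Str.slice seq (some x) (some (x + 10))
      let gc : Int := (PySem.Str.count subseq "G" : Int) + (PySem.Str.count subseq "C" : Int)
      if st.2 < gc then (subseq, gc) else st)
    ("", 0)
  if r.2 = 0 then ("This sequence has no G or C", 0) else r

-- ===== PORT B =====
def gc_subsequence_alt (seq : String) : String × Int :=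
  let pre : List Int := seq.toList.foldl
    (fun acc ch => acc ++ [PySem.List.pyGetD acc (-1) 0 + (if ch = 'G' ∨ ch = 'C' then (1 : Int) else 0)])
    [0]
  let r := (PySem.List.pyRange 0 (PySem.Str.len seq - 9)).foldl
    (fun (st : Int × Int) x =>
      let gc := PySem.List.pyGetD pre (x + 10) 0 - PySem.List.pyGetD pre x 0
      if st.2 < gc then (x, gc) else st)
    (-1, 0)
  if r.2 = 0 then ("This sequence has no G or C", 0)
  else (PySem.Str.slice seq (some r.1) (some (r.1 + 10)), r.2)

-- ===== PRECONDITION & SPEC =====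
def Spec_gc_subsequence (seq : String) (out : String × Int) : Prop := out = gc_subsequence_alt seq
instance (seq : String) (out : String × Int) : Decidable (Spec_gc_subsequence seq out) := by unfold Spec_gc_subsequence; infer_instance

-- ===== CLAIM (what is proved, stated in full; the proofs are below) =====
def Claim_equal_gc_subsequence : Prop := ∀ (seq : String), Dom_gc_subsequence seq → Spec_gc_subsequence seq (gc_subsequence seq)

-- ===== LEMMAS AND PROOFS =====

-- the G/C test both programs use
def gcP (c : Char) : Bool := c == 'G' || c == 'C'

-- A's per-window quantities
def fW (seq : String) (x : Int) : String := PySem.Str.slice seq (some x) (some (x + 10))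
def gA (seq : String) (x : Int) : Int :=
  (PySem.Str.count (fW seq x) "G" : Int) + (PySem.Str.count (fW seq x) "C" : Int)
-- B's prefix list and per-window quantity
def preF (seq : String) : List Int :=
  seq.toList.foldl
    (fun acc ch => acc ++ [PySem.List.pyGetD acc (-1) 0 + (if ch = 'G' ∨ ch = 'C' then (1 : Int) else 0)])
    [0]
def gB (seq : String) (x : Int) : Int :=
  PySem.List.pyGetD (preF seq) (x + 10) 0 - PySem.List.pyGetD (preF seq) x 0
-- the two selection folds
def selA (seq : String) : String × Int :=
  (PySem.List.pyRange 0 (PySem.Str.len seq - 9)).foldl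
    (fun st x => if st.2 < gA seq x then (fW seq x, gA seq x) else st) ("", 0)
def selB (seq : String) : Int × Int :=
  (PySem.List.pyRange 0 (PySem.Str.len seq - 9)).foldl
    (fun st x => if st.2 < gB seq x then (x, gB seq x) else st) (-1, 0)

theorem hA_eq (seq : String) :
    gc_subsequence seq = if (selA seq).2 = 0 then ("This sequence has no G or C", 0) else selA seq := rfl

theorem hB_eq (seq : String) :
    gc_subsequence_alt seq =
      if (selB seq).2 = 0 then ("This sequence has no G or C", 0)
      else (fW seq (selB seq).1, (selB seq).2) := rfl

-- Python str.count with a single-character pattern is List.count (no such lemma in the prelude)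
theorem count_go_singleton (c : Char) : ∀ (fuel : Nat) (l : List Char) (acc : Nat),
    l.length ≤ fuel → PySem.Chars.count.go [c] fuel l acc = acc + l.count c := by
  intro fuel
  induction fuel with
  | zero =>
    intro l acc h
    cases l with
    | nil => simp [PySem.Chars.count.go]
    | cons a t => simp at h
  | succ n ih =>
    intro l acc h
    cases l with
    | nil => simp [PySem.Chars.count.go]
    | cons a t =>
      simp only [PySem.Chars.count.go, List.isPrefixOf]
      by_cases hc : c = a
      · subst hc
        simp only [beq_self_eq_true, Bool.true_and, List.isPrefixOf, if_pos, List.length_cons,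
          List.length_nil, List.drop_succ_cons, List.drop_zero]
        rw [ih t (acc + 1) (by simpa using h)]
        simp [List.count_cons]
        omega
      · have hcb : (c == a) = false := by simpa using hc
        simp only [hcb, Bool.false_and, Bool.false_eq_true, if_false]
        rw [ih t acc (by simpa using h)]
        simp [List.count_cons, Ne.symm hc]

theorem count_singleton (l : List Char) (c : Char) :
    PySem.Chars.count l [c] = l.count c := by
  simp only [PySem.Chars.count, List.isEmpty, Bool.false_eq_true, if_false]
  rw [count_go_singleton c l.length l 0 (le_refl _)]
  simp

-- count G + count C = countP gcP
theorem count_GC (l : List Char) : l.count 'G' + l.count 'C' = l.countP gcP := by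
  induction l with
  | nil => simp
  | cons a t ih =>
    by_cases hg : a = 'G'
    · simp [List.count_cons, List.countP_cons, hg, gcP]; omega
    · by_cases hc : a = 'C'
      · simp [List.count_cons, List.countP_cons, hg, hc, gcP]; omega
      · simp [List.count_cons, List.countP_cons, hg, hc, gcP, ih]

-- the prefix-building fold, characterised
theorem prefix_fold (cs : List Char) : ∀ (acc : List Int) (last : Int),
    PySem.List.pyGetD acc (-1) 0 = last →
    cs.foldl (fun acc ch => acc ++ [PySem.List.pyGetD acc (-1) 0 + (if ch = 'G' ∨ ch = 'C' then (1 : Int) else 0)]) acc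
      = acc ++ (List.range cs.length).map (fun i => last + ((cs.take (i+1)).countP gcP : Int)) := by
  induction cs with
  | nil => intro acc last _; simp
  | cons a t ih =>
    intro acc last hlast
    simp only [List.foldl_cons, hlast]
    rw [ih (acc ++ [last + (if a = 'G' ∨ a = 'C' then (1:Int) else 0)])
        (last + (if a = 'G' ∨ a = 'C' then (1:Int) else 0))
        (PySem.List.pyGetD_neg_one_append_singleton acc _ 0)]
    rw [show List.range (a :: t).length = 0 :: (List.range t.length).map Nat.succ from
      List.range_succ_eq_map]
    rw [List.append_assoc]
    simp only [List.map_cons, List.map_map, List.cons_append, List.nil_append]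
    congr 1
    congr 1
    · by_cases h : a = 'G' ∨ a = 'C'
      · rcases h with h | h <;> simp [h, gcP, List.countP_cons]
      · push_neg at h
        simp [gcP, List.countP_cons, h.1, h.2]
    · apply List.map_congr_left
      intro i _
      simp only [Function.comp_apply, Nat.succ_eq_add_one]
      have ht : (a :: t).take (i + 1 + 1) = a :: t.take (i + 1) := rfl
      rw [ht, List.countP_cons]
      by_cases h : a = 'G' ∨ a = 'C'
      · rcases h with h | h <;> (simp [h, gcP]; push_cast; ring)
      · push_neg at h
        simp [gcP, h.1, h.2]

-- the prefix list is the map of partial counts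
theorem prefix_eq (seq : String) :
    preF seq = (List.range (seq.toList.length + 1)).map (fun i => ((seq.toList.take i).countP gcP : Int)) := by
  unfold preF
  rw [prefix_fold seq.toList [0] 0 (by decide)]
  rw [show List.range (seq.toList.length + 1) = 0 :: (List.range seq.toList.length).map Nat.succ from
    List.range_succ_eq_map]
  simp [List.map_map, Nat.succ_eq_add_one]

-- indexing the prefix list
theorem prefix_get (seq : String) (x : Int) (h0 : 0 ≤ x) (hle : x.toNat ≤ seq.toList.length) :
    PySem.List.pyGetD (preF seq) x 0 = ((seq.toList.take x.toNat).countP gcP : Int) := by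
  rw [prefix_eq]
  rw [show x = ((x.toNat : Nat) : Int) from (Int.toNat_of_nonneg h0).symm]
  rw [PySem.List.pyGetD_natCast, PySem.List.getD_map_range _ _ _ _ (by omega)]
  have hmax : ((x.toNat : Nat) : Int).toNat = x.toNat := by omega
  rw [hmax]

-- per-window agreement of the two GC computations
theorem window_eq (seq : String) (x : Int) (h0 : 0 ≤ x) (hx : x + 10 ≤ (seq.toList.length : Int)) :
    gA seq x = gB seq x := by
  unfold gA gB
  have h1 : (x + 10).toNat = x.toNat + 10 := by omega
  rw [prefix_get seq x h0 (by omega), prefix_get seq (x + 10) (by omega) (by omega), h1]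
  have hslice : (fW seq x).toList = (seq.toList.drop x.toNat).take 10 := by
    unfold fW
    rw [PySem.Str.toList_slice, PySem.Chars.slice_eq_listSlice,
        PySem.List.slice_toNat seq.toList h0 (by omega), h1]
    congr 1
    omega
  rw [show PySem.Str.count (fW seq x) "G" = (fW seq x).toList.count 'G' by
        rw [PySem.Str.count_eq]; exact count_singleton _ _,
      show PySem.Str.count (fW seq x) "C" = (fW seq x).toList.count 'C' by
        rw [PySem.Str.count_eq]; exact count_singleton _ _,
      hslice]
  rw [List.take_add, List.countP_append]
  have := count_GC ((seq.toList.drop x.toNat).take 10)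
  push_cast
  omega

-- the two selection folds, related step by step
theorem fold_rel (f : Int → String) (gA' gB' : Int → Int) (l : List Int)
    (h : ∀ x ∈ l, gA' x = gB' x) :
    ∀ (sA : String × Int) (sB : Int × Int), sA.2 = sB.2 → 0 ≤ sB.2 → (sB.2 ≠ 0 → sA.1 = f sB.1) →
      (l.foldl (fun st x => if st.2 < gA' x then (f x, gA' x) else st) sA).2
        = (l.foldl (fun st x => if st.2 < gB' x then (x, gB' x) else st) sB).2
      ∧ 0 ≤ (l.foldl (fun st x => if st.2 < gB' x then (x, gB' x) else st) sB).2
      ∧ ((l.foldl (fun st x => if st.2 < gB' x then (x, gB' x) else st) sB).2 ≠ 0 →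
          (l.foldl (fun st x => if st.2 < gA' x then (f x, gA' x) else st) sA).1
            = f (l.foldl (fun st x => if st.2 < gB' x then (x, gB' x) else st) sB).1) := by
  induction l with
  | nil => intro sA sB h1 h2 h3; exact ⟨h1, h2, h3⟩
  | cons a t ih =>
    intro sA sB h1 h2 h3
    have ha : gA' a = gB' a := h a (by simp)
    have hmem : ∀ x ∈ t, gA' x = gB' x := fun x hx => h x (by simp [hx])
    simp only [List.foldl_cons, ha, h1]
    by_cases hlt : sB.2 < gB' a
    · rw [if_pos hlt, if_pos hlt]
      exact ih hmem (f a, gB' a) (a, gB' a) rfl (by omega) (fun _ => rfl)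
    · rw [if_neg hlt, if_neg hlt]
      exact ih hmem sA sB h1 h2 h3

theorem sel_rel (seq : String) :
    (selA seq).2 = (selB seq).2 ∧
    ((selB seq).2 ≠ 0 → (selA seq).1 = fW seq (selB seq).1) := by
  have hwin : ∀ x ∈ PySem.List.pyRange 0 (PySem.Str.len seq - 9), gA seq x = gB seq x := by
    intro x hx
    rw [PySem.List.mem_pyRange_one] at hx
    rw [PySem.Str.len_eq] at hx
    exact window_eq seq x hx.1 (by omega)
  have := fold_rel (fW seq) (gA seq) (gB seq) (PySem.List.pyRange 0 (PySem.Str.len seq - 9)) hwin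
    ("", 0) (-1, 0) rfl (by norm_num) (fun h => absurd rfl h)
  exact ⟨this.1, this.2.2⟩

-- ===== VERDICT (by name: the statement is the Claim_ definition above) =====
theorem gc_subsequence_spec : Claim_equal_gc_subsequence := by
  intro seq _
  unfold Spec_gc_subsequence
  rw [hA_eq, hB_eq]
  obtain ⟨h2, h1⟩ := sel_rel seq
  by_cases hz : (selB seq).2 = 0
  · rw [if_pos (h2.trans hz), if_pos hz]
  · rw [if_neg (fun h => hz (h2 ▸ h)), if_neg hz]
    exact Prod.ext (h1 hz) h2
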